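-- pv_equiv track=rewrite | github.com/tataru1/Fundamentele-Programarii | PycharmProjects/pythonProject5/main.py | konk
-- ===== SOURCE A (Python) =====
-- def konk(list):
--     l=[]
--     number=''
--     for e in list:
--         e=str(e)
--         for i in e:
--             if i not in l:
--                 l.append(int(i))
--     l.sort(reverse=True)
--     for idx in l:
--         idx=str(idx)
--         number+=idx
--     return int(number)
-- ===== SOURCE B (Python) =====
-- def konk(list):
--     count = [0] * 10
--     for e in list:
--         for c in str(e):
--             count[int(c)] += 1
--     number = ''
--     for d in range(9, -1, -1):
--         number += str(d) * count[d]
--     return int(number)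
-- ===== Notes on version B (the rewrite author's own statement) =====
-- stated objective: alternative
-- what changed: B replaces A's collect-all-digits-then-comparison-sort (plus the dead str-vs-int dedup test) with a counting sort: one pass over the digit characters fills a 10-slot count array, then the result string is built from digit 9 down to 0.
-- outside the precondition, e.g. on konk([]): A raises ValueError, B raises ValueError; on konk([-3]): A raises ValueError, B raises ValueError
import Mathlib
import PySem

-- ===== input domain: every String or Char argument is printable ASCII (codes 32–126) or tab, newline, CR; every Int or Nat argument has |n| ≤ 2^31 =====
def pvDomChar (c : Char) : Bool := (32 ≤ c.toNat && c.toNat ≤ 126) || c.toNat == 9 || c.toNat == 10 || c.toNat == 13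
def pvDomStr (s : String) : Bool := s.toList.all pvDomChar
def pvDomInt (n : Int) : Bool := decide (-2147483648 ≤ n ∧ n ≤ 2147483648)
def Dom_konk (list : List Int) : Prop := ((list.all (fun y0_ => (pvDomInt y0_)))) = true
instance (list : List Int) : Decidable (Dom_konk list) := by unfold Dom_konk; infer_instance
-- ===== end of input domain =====

-- B replaces A's build-all-digits-then-comparison-sort by a counting sort over the ten digit values (alternative algorithm, same cost class on these sizes).

-- ===== PORT A =====
-- Python's `i in l` compares a 1-char str `i` with the ints stored in `l`: always False in Python 3,
-- so the dedup branch never fires and every digit is appended.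
def pyStrMemIntList (_i : Char) (_l : List Int) : Bool := false

def konk (list : List Int) : Int :=
  let l : List Int := list.foldl (fun l e =>
    let e' := PySem.Int.toChars e                      -- e = str(e)
    e'.foldl (fun l i =>
      if !(pyStrMemIntList i l) then                   -- if i not in l:
        l ++ [(PySem.Int.ofStr? (String.ofList [i])).getD 0]   -- l.append(int(i)); Pre_ excludes the ValueError ('-')
      else l) l) []
  let l := PySem.List.sorted l (fun x => x) true       -- l.sort(reverse=True)
  let number : List Char := l.foldl (fun number idx =>
    number ++ PySem.Int.toChars idx) []                -- number += str(idx)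
  (PySem.Int.ofChars? number).getD 0                   -- int(number); Pre_ excludes the ValueError ('')

-- ===== PORT B =====
def konk_alt (list : List Int) : Int :=
  let count : List Int := list.foldl (fun count e =>
    (PySem.Int.toChars e).foldl (fun count c =>
      count.modify ((PySem.Int.ofStr? (String.ofList [c])).getD 0).toNat (· + 1)) count)
    (List.replicate 10 0)                              -- count[int(c)] += 1; Pre_ excludes the ValueError ('-')
  let number : List Char := (PySem.List.pyRange 9 (-1) (-1)).foldl (fun number d =>
    number ++ PySem.List.pyRepeat (PySem.Int.toChars d) (count.getD d.toNat 0)) []   -- number += str(d) * count[d]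
  (PySem.Int.ofChars? number).getD 0                   -- int(number); Pre_ excludes the ValueError ('')

-- ===== PRECONDITION & SPEC =====
-- Pre_ excludes exactly the inputs where the Python A raises ValueError: the empty list (int('')) and
-- lists containing a negative element (int('-')); B raises there too.
def Pre_konk (list : List Int) : Prop := list ≠ [] ∧ ∀ e ∈ list, 0 ≤ e
instance (list : List Int) : Decidable (Pre_konk list) := by unfold Pre_konk; infer_instance
def pvWitness_konk : List Int := ([10, 3])
def Spec_konk (list : List Int) (out : Int) : Prop := out = konk_alt list
instance (list : List Int) (out : Int) : Decidable (Spec_konk list out) := by unfold Spec_konk; infer_instance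

-- ===== CLAIM (what is proved, stated in full; the proofs are below) =====
def Claim_equal_konk : Prop := ∀ (list : List Int), Dom_konk list → Pre_konk list → Spec_konk list (konk list)

-- ===== LEMMAS AND PROOFS =====

-- int(i) for a 1-char string i, as both ports compute it
def pvVal (c : Char) : Int := (PySem.Int.ofChars? [c]).getD 0

-- a character produced by str() of a nonnegative int: its int() value is a digit and str() round-trips
def pvGood (c : Char) : Prop := 0 ≤ pvVal c ∧ pvVal c ≤ 9 ∧ PySem.Int.toChars (pvVal c) = [c]

theorem pvGood_digitChar (m : Nat) (h : m < 10) : pvGood (Nat.digitChar m) := by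
  interval_cases m <;> exact ⟨by decide, by decide, by decide⟩

theorem pvGood_toDigitsCore : ∀ (f n : Nat) (acc : List Char),
    (∀ c ∈ acc, pvGood c) → ∀ c ∈ Nat.toDigitsCore 10 f n acc, pvGood c := by
  intro f
  induction f with
  | zero => intro n acc h c hc; simpa [Nat.toDigitsCore] using h c (by simpa [Nat.toDigitsCore] using hc)
  | succ f ih =>
    intro n acc h c hc
    rw [Nat.toDigitsCore] at hc
    by_cases hz : n / 10 = 0
    · simp only [hz] at hc
      rcases List.mem_cons.mp hc with rfl | hc
      · exact pvGood_digitChar _ (Nat.mod_lt _ (by omega))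
      · exact h c hc
    · simp only [if_neg hz] at hc
      refine ih _ _ ?_ c hc
      intro c' hc'
      rcases List.mem_cons.mp hc' with rfl | hc'
      · exact pvGood_digitChar _ (Nat.mod_lt _ (by omega))
      · exact h c' hc'

theorem pvGood_toChars (e : Int) (he : 0 ≤ e) : ∀ c ∈ PySem.Int.toChars e, pvGood c := by
  intro c hc
  unfold PySem.Int.toChars at hc
  rw [if_neg (by omega)] at hc
  exact pvGood_toDigitsCore _ _ _ (by simp) c hc

-- ----- flattening A's digit-collecting loop -----
theorem konk_l_eq (es : List Int) (l0 : List Int) :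
    es.foldl (fun l e =>
      (PySem.Int.toChars e).foldl (fun l i =>
        if !(pyStrMemIntList i l) then l ++ [(PySem.Int.ofChars? [i]).getD 0] else l) l) l0
    = l0 ++ (es.flatMap PySem.Int.toChars).map pvVal := by
  induction es generalizing l0 with
  | nil => simp
  | cons e es ih =>
    have hinner : ∀ l0 : List Int,
        (PySem.Int.toChars e).foldl (fun l i =>
          if !(pyStrMemIntList i l) then l ++ [(PySem.Int.ofChars? [i]).getD 0] else l) l0
          = l0 ++ (PySem.Int.toChars e).map pvVal := by
      intro l0
      simp only [pyStrMemIntList, Bool.not_false, if_true]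
      exact PySem.List.foldl_append_singleton_eq_map _ _ _
    rw [List.foldl_cons, hinner, ih, List.flatMap_cons, List.map_append, List.append_assoc]

-- ----- flattening B's nested counting loop -----
theorem konk_count_flatten (es : List Int) (C0 : List Int) :
    es.foldl (fun C e =>
      (PySem.Int.toChars e).foldl (fun C c =>
        C.modify ((PySem.Int.ofChars? [c]).getD 0).toNat (· + 1)) C) C0
    = (es.flatMap PySem.Int.toChars).foldl (fun C c => C.modify (pvVal c).toNat (· + 1)) C0 := by
  induction es generalizing C0 with
  | nil => simp
  | cons e es ih =>
    simp only [List.foldl_cons, List.flatMap_cons, List.foldl_append, pvVal]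
    exact ih _

theorem konk_count_spec (cs : List Char) : ∀ (C : List Int), (∀ c ∈ cs, pvGood c) → C.length = 10 →
    ∀ k : Nat, k < 10 →
    (cs.foldl (fun C c => C.modify (pvVal c).toNat (· + 1)) C).getD k 0
      = C.getD k 0 + ((cs.map pvVal).count (k : Int) : Int) := by
  induction cs with
  | nil => intro C _ _ k _; simp
  | cons c cs ih =>
    intro C hg hlen k hk
    have hgc := hg c (List.mem_cons_self)
    have hrec := ih (C.modify (pvVal c).toNat (· + 1)) (fun c' hc' => hg c' (List.mem_cons_of_mem _ hc'))
      (by simpa using hlen) k hk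
    simp only [List.foldl_cons, hrec, List.map_cons, List.count_cons]
    have hge := hgc.1
    have hmod : (C.modify (pvVal c).toNat (· + 1)).getD k 0
        = C.getD k 0 + (if pvVal c = (k : Int) then 1 else 0) := by
      have h1 : (C.modify (pvVal c).toNat (· + 1))[k]? = (fun a => if (pvVal c).toNat = k then a + 1 else a) <$> C[k]? :=
        List.getElem?_modify _ _ _ _
      have h2 : C[k]? = some (C.getD k 0) := by
        rw [List.getD_eq_getElem?_getD]
        have : k < C.length := by omega
        simp [List.getElem?_eq_getElem this]
      rw [List.getD_eq_getElem?_getD, h1, h2]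
      have : (pvVal c).toNat = k ↔ pvVal c = (k : Int) := by omega
      by_cases hcase : pvVal c = (k : Int) <;> simp [this, hcase]
    rw [hmod]
    by_cases hcase : pvVal c = (k : Int)
    · simp [hcase]
      ring
    · simp [hcase]

-- ----- counting-sort characterisation of sorted(…, reverse=True) on digits -----
theorem pairwise_ge_flatMap_replicate (f : Int → Nat) :
    ∀ (ds : List Int), ds.Pairwise (· > ·) →
      (ds.flatMap (fun d => List.replicate (f d) d)).Pairwise (· ≥ ·) := by
  intro ds
  induction ds with
  | nil => intro _; simp
  | cons d ds ih =>
    intro h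
    rcases List.pairwise_cons.mp h with ⟨hd, ht⟩
    simp only [List.flatMap_cons]
    rw [List.pairwise_append]
    refine ⟨List.pairwise_replicate.mpr (by simp), ih ht, ?_⟩
    intro x hx y hy
    rcases List.eq_of_mem_replicate hx with rfl
    rcases List.mem_flatMap.mp hy with ⟨e, he, hy2⟩
    rcases List.eq_of_mem_replicate hy2 with rfl
    exact le_of_lt (hd _ he)

theorem sorted_eq_counting (L : List Int) (h : ∀ x ∈ L, 0 ≤ x ∧ x ≤ 9) :
    PySem.List.sorted L (fun x => x) true
      = ([9,8,7,6,5,4,3,2,1,0] : List Int).flatMap (fun d => List.replicate (L.count d) d) := by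
  refine List.Perm.eq_of_pairwise (le := fun a b => a ≥ b) (fun a b _ _ h1 h2 => le_antisymm h2 h1) ?_ ?_ ?_
  · exact PySem.List.sorted_pairwise_rev L (fun x => x)
  · exact pairwise_ge_flatMap_replicate _ _ (by decide)
  · refine (PySem.List.sorted_perm L (fun x => x) true).trans ?_
    rw [List.perm_iff_count]
    intro a
    by_cases ha : 0 ≤ a ∧ a ≤ 9
    · obtain ⟨h0, h9⟩ := ha
      interval_cases a <;>
        simp [List.flatMap_cons, List.count_append, List.count_replicate]
    · have hnot : a ∉ L := fun hm => ha (h a hm)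
      rw [List.count_eq_zero.mpr hnot]
      have : ∀ d ∈ ([9,8,7,6,5,4,3,2,1,0] : List Int), a ≠ d := by
        intro d hd heq
        subst heq
        fin_cases hd <;> omega
      rw [eq_comm, List.count_eq_zero]
      intro hm
      rcases List.mem_flatMap.mp hm with ⟨d, hd, hmem⟩
      rcases List.eq_of_mem_replicate hmem with rfl
      exact this _ hd rfl

theorem flatMap_replicate_singleton (n : Nat) (d : Int) (c : Char)
    (h : PySem.Int.toChars d = [c]) :
    (List.replicate n d).flatMap PySem.Int.toChars = List.replicate n c := by
  induction n with
  | zero => simp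
  | succ n ih => simp [List.replicate_succ, ih, h]

-- ===== VERDICT (by name: the statement is the Claim_ definition above) =====
theorem konk_spec : Claim_equal_konk := by
  intro list _ hpre
  obtain ⟨-, hnn⟩ := hpre
  unfold Spec_konk
  simp only [konk, konk_alt, PySem.Int.ofStr?_ofList]
  rw [konk_l_eq, konk_count_flatten]
  have hgood : ∀ c ∈ list.flatMap PySem.Int.toChars, pvGood c := by
    intro c hc
    rcases List.mem_flatMap.mp hc with ⟨e, he, hce⟩
    exact pvGood_toChars e (hnn e he) c hce
  have hL : ∀ x ∈ (list.flatMap PySem.Int.toChars).map pvVal, 0 ≤ x ∧ x ≤ 9 := by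
    intro x hx
    rcases List.mem_map.mp hx with ⟨c, hc, rfl⟩
    exact ⟨(hgood c hc).1, (hgood c hc).2.1⟩
  have hcnt : ∀ k : Nat, k < 10 →
      ((list.flatMap PySem.Int.toChars).foldl
        (fun C c => C.modify (pvVal c).toNat (· + 1)) (List.replicate 10 0)).getD k 0
      = (((list.flatMap PySem.Int.toChars).map pvVal).count (k : Int) : Int) := by
    intro k hk
    rw [konk_count_spec _ _ hgood (by simp) k hk]
    have hz : (List.replicate 10 (0:Int)).getD k 0 = 0 := by interval_cases k <;> rfl
    rw [hz, zero_add]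
  have hrange : PySem.List.pyRange 9 (-1) (-1) = ([9,8,7,6,5,4,3,2,1,0] : List Int) := by decide
  rw [List.nil_append, sorted_eq_counting _ hL, hrange,
      PySem.List.foldl_append_eq_flatMap, PySem.List.foldl_append_eq_flatMap, List.nil_append, List.nil_append]
  congr 1
  simp only [List.flatMap_cons, List.flatMap_nil, List.flatMap_append]
  rw [flatMap_replicate_singleton _ 9 '9' rfl, flatMap_replicate_singleton _ 8 '8' rfl,
      flatMap_replicate_singleton _ 7 '7' rfl, flatMap_replicate_singleton _ 6 '6' rfl,
      flatMap_replicate_singleton _ 5 '5' rfl, flatMap_replicate_singleton _ 4 '4' rfl,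
      flatMap_replicate_singleton _ 3 '3' rfl, flatMap_replicate_singleton _ 2 '2' rfl,
      flatMap_replicate_singleton _ 1 '1' rfl, flatMap_replicate_singleton _ 0 '0' rfl]
  have h9 := hcnt 9 (by omega); have h8 := hcnt 8 (by omega); have h7 := hcnt 7 (by omega)
  have h6 := hcnt 6 (by omega); have h5 := hcnt 5 (by omega); have h4 := hcnt 4 (by omega)
  have h3 := hcnt 3 (by omega); have h2 := hcnt 2 (by omega); have h1 := hcnt 1 (by omega)
  have h0 := hcnt 0 (by omega)
  simp only [show ((9:Int).toNat) = 9 from rfl, show ((8:Int).toNat) = 8 from rfl,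
    show ((7:Int).toNat) = 7 from rfl, show ((6:Int).toNat) = 6 from rfl,
    show ((5:Int).toNat) = 5 from rfl, show ((4:Int).toNat) = 4 from rfl,
    show ((3:Int).toNat) = 3 from rfl, show ((2:Int).toNat) = 2 from rfl,
    show ((1:Int).toNat) = 1 from rfl, show ((0:Int).toNat) = 0 from rfl]
  rw [h9, h8, h7, h6, h5, h4, h3, h2, h1, h0]
  simp [PySem.List.pyRepeat_singleton,
    show PySem.Int.toChars 9 = ['9'] from rfl, show PySem.Int.toChars 8 = ['8'] from rfl,
    show PySem.Int.toChars 7 = ['7'] from rfl, show PySem.Int.toChars 6 = ['6'] from rfl,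
    show PySem.Int.toChars 5 = ['5'] from rfl, show PySem.Int.toChars 4 = ['4'] from rfl,
    show PySem.Int.toChars 3 = ['3'] from rfl, show PySem.Int.toChars 2 = ['2'] from rfl,
    show PySem.Int.toChars 1 = ['1'] from rfl, show PySem.Int.toChars 0 = ['0'] from rfl]
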